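-- pv_equiv track=rewrite | github.com/kelaplicativos-rgb/ia-planilhas | bling_app_zero/utils/gtin.py | _padrao_ciclico_curto
-- ===== SOURCE A (Python) =====
-- def _padrao_ciclico_curto(gtin: str) -> bool:
--     """
--     Detecta padrões artificiais como:
--     12121212 / 123123123123 / 909090909090
--     """
--     try:
--         if not gtin or len(gtin) < 8:
--             return False
--
--         for tamanho_bloco in (1, 2, 3, 4):
--             if len(gtin) % tamanho_bloco != 0:
--                 continue
--             bloco = gtin[:tamanho_bloco]
--             if bloco and (bloco * (len(gtin) // tamanho_bloco)) == gtin: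
--                 return True
--
--         return False
--     except Exception:
--         return False
-- ===== SOURCE B (Python) =====
-- def _padrao_ciclico_curto(gtin: str) -> bool:
--     try:
--         if not gtin or len(gtin) < 8:
--             return False
--         p = (gtin + gtin).find(gtin, 1)
--         return p <= 4 and len(gtin) % p == 0
--     except Exception:
--         return False
-- ===== Notes on version B (the rewrite author's own statement) =====
-- stated objective: idiomatic
-- what changed: Replaces the explicit loop over candidate block sizes 1-4 with the standard self-concatenation minimal-period idiom: p = (s+s).find(s, 1), then checks p <= 4 and len(s) % p == 0.
import Mathlib
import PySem

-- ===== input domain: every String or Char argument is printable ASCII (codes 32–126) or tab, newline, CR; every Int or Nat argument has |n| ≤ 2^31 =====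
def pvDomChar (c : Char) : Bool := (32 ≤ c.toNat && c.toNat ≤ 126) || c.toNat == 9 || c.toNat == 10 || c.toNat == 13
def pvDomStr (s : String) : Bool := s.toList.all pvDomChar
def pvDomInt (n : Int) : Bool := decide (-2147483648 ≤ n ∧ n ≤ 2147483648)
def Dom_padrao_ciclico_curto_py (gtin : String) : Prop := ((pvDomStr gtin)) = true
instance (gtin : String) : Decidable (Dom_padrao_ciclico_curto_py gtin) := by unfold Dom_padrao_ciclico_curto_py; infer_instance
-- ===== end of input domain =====

-- B replaces A's explicit loop over block sizes 1–4 with the self-concatenation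
-- minimal-period idiom ((s+s).find(s,1)); same return value, alternative algorithm.

-- ===== PORT A =====
-- A's `for tamanho_bloco in (1, 2, 3, 4)` loop: recursion over the literal list [1,2,3,4];
-- `continue` = recurse, `return True` = true, falling off the loop = false.
def pvALoop (l : List Char) : List Nat → Bool
  | [] => false
  | t :: ts =>
    if l.length % t ≠ 0 then pvALoop l ts
    else
      let bloco := l.take t
      -- `bloco and (bloco * (len(gtin) // tamanho_bloco)) == gtin`
      if (!bloco.isEmpty) && ((List.replicate (l.length / t) bloco).flatten == l) then true
      else pvALoop l ts

def padrao_ciclico_curto_py (gtin : String) : Bool :=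
  let l := gtin.toList
  -- `if not gtin or len(gtin) < 8: return False`
  if l.isEmpty || l.length < 8 then false
  else pvALoop l [1, 2, 3, 4]

-- ===== PORT B =====
def padrao_ciclico_curto_py_alt (gtin : String) : Bool :=
  let l := gtin.toList
  if l.isEmpty || l.length < 8 then false
  else
    -- `p = (gtin + gtin).find(gtin, 1)`  (exact: PySem.Chars.findFrom on the char lists)
    let p := PySem.Chars.findFrom (l ++ l) l 1
    -- `return p <= 4 and len(gtin) % p == 0`  (Python `%` = PySem.Int.mod)
    decide (p ≤ 4) && decide (PySem.Int.mod (l.length : Int) p = 0)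

-- ===== PRECONDITION & SPEC =====
def Spec_padrao_ciclico_curto_py (gtin : String) (out : Bool) : Prop := out = padrao_ciclico_curto_py_alt gtin
instance (gtin : String) (out : Bool) : Decidable (Spec_padrao_ciclico_curto_py gtin out) := by unfold Spec_padrao_ciclico_curto_py; infer_instance

-- ===== CLAIM (what is proved, stated in full; the proofs are below) =====
def Claim_equal_padrao_ciclico_curto_py : Prop := ∀ (gtin : String), Dom_padrao_ciclico_curto_py gtin → Spec_padrao_ciclico_curto_py gtin (padrao_ciclico_curto_py gtin)

-- ===== LEMMAS AND PROOFS =====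

-- Occurrence of l at offset t in l++l (t ≤ len l) is exactly rotation-invariance by t.
lemma pv_prefix_drop_iff_rotate (l : List Char) (t : Nat) (ht : t ≤ l.length) :
    l <+: (l ++ l).drop t ↔ l.rotate t = l := by
  rw [List.drop_append_of_le_length ht, List.prefix_iff_eq_take,
      List.rotate_eq_drop_append_take ht]
  rw [List.take_append, List.take_of_length_le (by simp),
      List.length_drop]
  have : l.length - (l.length - t) = t := by omega
  rw [this]
  exact eq_comm

lemma pv_rotate_mul (l : List Char) (t k : Nat) (h : l.rotate t = l) :
    l.rotate (k * t) = l := by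
  induction k with
  | zero => simp
  | succ k ih => rw [Nat.succ_mul, ← List.rotate_rotate, ih, h]

-- t ∣ n and rotation-invariance by t ⇔ l is the t-block repeated n/t times.
lemma pv_rotate_to_blocks (t : Nat) (_ht : 0 < t) :
    ∀ (k : Nat) (l : List Char), l.length = k * t → l.rotate t = l →
      (List.replicate k (l.take t)).flatten = l := by
  intro k
  induction k with
  | zero => intro l hl _; simp_all [List.eq_nil_of_length_eq_zero]
  | succ k ih =>
    intro l hl hrot
    have htl : t ≤ l.length := by
      rw [hl, Nat.succ_mul]; exact Nat.le_add_left t (k * t)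
    have hdec : l.take t ++ l.drop t = l := List.take_append_drop t l
    have hrot' : l.drop t ++ l.take t = l := by
      rw [← List.rotate_eq_drop_append_take htl]; exact hrot
    have hlenl' : (l.drop t).length = k * t := by
      rw [List.length_drop, hl, Nat.succ_mul, Nat.add_sub_cancel]
    have hlenb : (l.take t).length = t := by
      rw [List.length_take, min_eq_left htl]
    by_cases hk : k = 0
    · subst hk
      have h0 : l.drop t = [] := List.eq_nil_of_length_eq_zero (by simp [hlenl'])
      rw [h0, List.append_nil] at hdec
      simp only [zero_add, List.replicate_one, List.flatten_cons, List.flatten_nil,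
        List.append_nil]
      exact hdec
    · have htl' : t ≤ (l.drop t).length := by
        rw [hlenl']
        calc t = 1 * t := (one_mul t).symm
          _ ≤ k * t := Nat.mul_le_mul_right t (Nat.one_le_iff_ne_zero.mpr hk)
      have hcomm : l.take t ++ l.drop t = l.drop t ++ l.take t := by rw [hdec, hrot']
      have hdropb : (l.take t).drop t = [] := List.drop_eq_nil_of_le hlenb.le
      have htake : (l.drop t).take t = l.take t := by
        have h1 : (l.take t ++ l.drop t).take t = l.take t := by
          rw [List.take_append, hlenb, Nat.sub_self, List.take_zero, List.append_nil,
            List.take_of_length_le hlenb.le]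
        have h2 : (l.drop t ++ l.take t).take t = (l.drop t).take t := by
          rw [List.take_append, Nat.sub_eq_zero_of_le htl', List.take_zero, List.append_nil]
        rw [← h2, ← hcomm]
        exact h1
      have hrotl' : (l.drop t).rotate t = l.drop t := by
        rw [List.rotate_eq_drop_append_take htl', htake]
        have h3 : (l.take t ++ l.drop t).drop t = l.drop t := by
          rw [List.drop_append_of_le_length hlenb.ge, hdropb, List.nil_append]
        have h4 : (l.drop t ++ l.take t).drop t = (l.drop t).drop t ++ l.take t :=
          List.drop_append_of_le_length htl'
        rw [← h4, ← hcomm]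
        exact h3
      have hrec := ih (l.drop t) hlenl' hrotl'
      rw [htake] at hrec
      rw [List.replicate_succ, List.flatten_cons, hrec, hdec]

lemma pv_flatten_replicate_comm (k : Nat) (b : List Char) :
    (List.replicate k b).flatten ++ b = b ++ (List.replicate k b).flatten := by
  induction k with
  | zero => simp
  | succ k ih => simp only [List.replicate_succ, List.flatten_cons, List.append_assoc, ih]

lemma pv_blocks_to_rotate (t : Nat) (_ht : 0 < t) (k : Nat) (l : List Char)
    (hl : l.length = k * t) (hblk : (List.replicate k (l.take t)).flatten = l) :
    l.rotate t = l := by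
  by_cases hk : k = 0
  · subst hk
    have : l = [] := List.eq_nil_of_length_eq_zero (by simp [hl])
    simp [this]
  · have htl : t ≤ l.length := by
      rw [hl]
      calc t = 1 * t := (one_mul t).symm
        _ ≤ k * t := Nat.mul_le_mul_right t (Nat.one_le_iff_ne_zero.mpr hk)
    have hlenb : (l.take t).length = t := by rw [List.length_take, min_eq_left htl]
    have hdropb : (l.take t).drop t = [] := List.drop_eq_nil_of_le hlenb.le
    rw [List.rotate_eq_drop_append_take htl]
    obtain ⟨k', rfl⟩ : ∃ k', k = k' + 1 := ⟨k - 1, by omega⟩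
    have hdrop : l.drop t = (List.replicate k' (l.take t)).flatten := by
      conv_lhs => rw [← hblk]
      rw [List.replicate_succ, List.flatten_cons,
        List.drop_append_of_le_length hlenb.ge, hdropb, List.nil_append]
    rw [hdrop, pv_flatten_replicate_comm]
    conv_rhs => rw [← hblk]
    rw [List.replicate_succ, List.flatten_cons]

-- The loop of A is true iff some listed block size works.
lemma pv_aloop_spec (l : List Char) (ts : List Nat) :
    pvALoop l ts = true ↔
      ∃ t ∈ ts, l.length % t = 0 ∧ (l.take t) ≠ [] ∧
        (List.replicate (l.length / t) (l.take t)).flatten = l := by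
  induction ts with
  | nil => simp [pvALoop]
  | cons t ts ih =>
    simp only [pvALoop, List.mem_cons]
    by_cases h1 : l.length % t ≠ 0
    · simp only [if_pos h1, ih]
      constructor
      · rintro ⟨u, hu, hrest⟩
        exact ⟨u, Or.inr hu, hrest⟩
      · rintro ⟨u, (rfl | hu), hrest⟩
        · exact absurd hrest.1 h1
        · exact ⟨u, hu, hrest⟩
    · simp only [if_neg h1]
      rw [not_not] at h1
      by_cases h2 : (!(l.take t).isEmpty) && ((List.replicate (l.length / t) (l.take t)).flatten == l)
      · simp only [if_pos h2, true_iff]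
        have hb : (l.take t) ≠ [] ∧ (List.replicate (l.length / t) (l.take t)).flatten = l := by
          simpa [List.isEmpty_iff] using h2
        exact ⟨t, Or.inl rfl, h1, hb.1, hb.2⟩
      · simp only [if_neg h2, ih]
        constructor
        · rintro ⟨u, hu, hrest⟩
          exact ⟨u, Or.inr hu, hrest⟩
        · rintro ⟨u, (rfl | hu), hrest⟩
          · exfalso
            apply h2
            have hne : (!(l.take u).isEmpty) = true := by
              simpa [List.isEmpty_iff] using hrest.2.1
            have heq : ((List.replicate (l.length / u) (l.take u)).flatten == l) = true :=
              beq_iff_eq.mpr hrest.2.2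
            rw [Bool.and_eq_true]
            exact ⟨hne, heq⟩
          · exact ⟨u, hu, hrest⟩

theorem pv_main (gtin : String) :
    padrao_ciclico_curto_py gtin = padrao_ciclico_curto_py_alt gtin := by
  unfold padrao_ciclico_curto_py padrao_ciclico_curto_py_alt
  set l := gtin.toList with hl
  by_cases hguard : l.isEmpty || l.length < 8
  · simp [hguard]
  · rw [if_neg hguard, if_neg hguard]
    simp only [Bool.or_eq_true, decide_eq_true_eq, not_or, List.isEmpty_iff] at hguard
    obtain ⟨hne, hlen8⟩ := hguard
    rw [Nat.not_lt] at hlen8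
    set n := l.length with hn
    have hn8 : 8 ≤ n := hlen8
    have hnpos : 0 < n := by omega
    -- the find: p = 1 + q where q = find of l in (l++l).drop 1
    have hk1 : (1 : Nat) ≤ (l ++ l).length := by simp; omega
    have hocc : l <:+: (l ++ l).drop 1 := by
      have hdrop : (l ++ l).drop n = l := by
        rw [List.drop_append_of_le_length hn.le, hn, List.drop_length, List.nil_append]
      refine List.IsSuffix.isInfix ?_
      refine ⟨((l ++ l).drop 1).take (n - 1), ?_⟩
      have : ((l ++ l).drop 1).drop (n-1) = l := by
        rw [List.drop_drop]
        have h5 : 1 + (n - 1) = n := by omega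
        rw [h5, hdrop]
      conv_rhs => rw [← List.take_append_drop (n-1) ((l ++ l).drop 1)]
      rw [this]
    set q := PySem.Chars.find ((l ++ l).drop 1) l with hq
    have hqpos : 0 ≤ q := (PySem.Chars.find_nonneg_iff _ _).mpr hocc
    have hfrom : PySem.Chars.findFrom (l ++ l) l 1 = 1 + q := by
      have := PySem.Chars.findFrom_natCast (l ++ l) l 1 hk1
      rw [Nat.cast_one] at this
      rw [this, ← hq, if_neg (by omega)]
    obtain ⟨hpref, hmin⟩ := PySem.Chars.find_spec (s := (l ++ l).drop 1) (sub := l) hqpos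
    rw [← hq] at hpref hmin
    set m := 1 + q.toNat with hm
    have hmpos : 0 < m := by omega
    -- P m holds, no P t for 1 ≤ t < m
    have hPm : l <+: (l ++ l).drop m := by
      rw [hm, ← List.drop_drop]
      exact hpref
    have hPmin : ∀ t, 1 ≤ t → t < m → ¬ l <+: (l ++ l).drop t := by
      intro t h1t htm hcon
      apply hmin (t - 1) (by omega)
      rw [List.drop_drop]
      have h6 : 1 + (t - 1) = t := by omega
      rw [h6]; exact hcon
    -- m ≤ n since rotation by n works
    have hPn : l <+: (l ++ l).drop n := by
      rw [pv_prefix_drop_iff_rotate l n (le_refl _)]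
      exact List.rotate_length l
    have hmn : m ≤ n := by
      by_contra hcon
      exact hPmin n (by omega) (by omega) hPn
    have hrotm : l.rotate m = l := (pv_prefix_drop_iff_rotate l m hmn).mp hPm
    -- m divides n
    have hrotnm : l.rotate (n % m) = l := by
      have h1 : l.rotate (m * (n / m)) = l := by
        rw [mul_comm]; exact pv_rotate_mul l m (n / m) hrotm
      calc l.rotate (n % m) = (l.rotate (m * (n / m))).rotate (n % m) := by rw [h1]
        _ = l.rotate (m * (n / m) + n % m) := List.rotate_rotate l _ _
        _ = l.rotate n := by rw [Nat.div_add_mod]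
        _ = l := List.rotate_length l
    have hdvd : n % m = 0 := by
      by_contra hcon
      have h1 : 1 ≤ n % m := by omega
      have h2 : n % m < m := Nat.mod_lt n hmpos
      exact hPmin (n % m) h1 h2
        ((pv_prefix_drop_iff_rotate l (n % m) (by omega)).mpr hrotnm)
    -- evaluate B and compare with A's loop
    have hmodB : PySem.Int.mod (n : Int) (1 + q) = 0 := by
      have hq1 : (1 + q) = (m : Int) := by omega
      rw [hq1]
      have hmm : PySem.Int.mod (n : Int) (m : Int) = (n : Int) % (m : Int) := by
        simp [PySem.Int.mod, Int.fmod_eq_emod]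
      rw [hmm]
      omega
    rw [hfrom, Bool.eq_iff_iff, pv_aloop_spec]
    simp only [hmodB, decide_eq_true_eq, decide_true, Bool.and_true]
    have htake_ne : ∀ t : Nat, 0 < t → l.take t ≠ [] := by
      intro t htpos hcon
      have hlen := congrArg List.length hcon
      rw [List.length_take, List.length_nil] at hlen
      omega
    constructor
    · -- A true ⇒ p ≤ 4 : minimality of the find offset
      rintro ⟨t, htmem, htdvd, -, hblk⟩
      have ht4 : 1 ≤ t ∧ t ≤ 4 := by
        simp only [List.mem_cons, List.not_mem_nil, or_false] at htmem
        rcases htmem with rfl | rfl | rfl | rfl <;> omega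
      have hnt : n / t * t = n := Nat.div_mul_cancel (Nat.dvd_of_mod_eq_zero htdvd)
      have hrott : l.rotate t = l :=
        pv_blocks_to_rotate t (by omega) (n / t) l (hn.symm.trans hnt.symm) hblk
      have hPt : l <+: (l ++ l).drop t :=
        (pv_prefix_drop_iff_rotate l t (by omega)).mpr hrott
      have hmt : m ≤ t := by
        by_contra hcon
        exact hPmin t (by omega) (by omega) hPt
      omega
    · -- p ≤ 4 ⇒ A finds the block at t = m (m divides n, rotation gives the blocks)
      intro hb
      have hm4 : m ≤ 4 := by omega
      refine ⟨m, ?_, hdvd, htake_ne m hmpos, ?_⟩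
      · simp only [List.mem_cons, List.not_mem_nil, or_false]
        omega
      · have hnm : n / m * m = n := Nat.div_mul_cancel (Nat.dvd_of_mod_eq_zero hdvd)
        exact pv_rotate_to_blocks m hmpos (n / m) l (hn.symm.trans hnm.symm) hrotm

-- ===== VERDICT (by name: the statement is the Claim_ definition above) =====
theorem padrao_ciclico_curto_py_spec : Claim_equal_padrao_ciclico_curto_py := by
  intro gtin _
  unfold Spec_padrao_ciclico_curto_py
  exact pv_main gtin
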